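-- pv_equiv track=rewrite | github.com/hongsy0113/algorithm-study | baekjoon/samsung/14889/1.py | solution
-- ===== SOURCE A (Python) =====
-- INF = 999999
--
-- def get_combinations(arr, n):
--     result = []
--
--     if n == 0:
--         return [[]]
--
--     for i in range(len(arr)):
--         v = arr[i]
--         rest_part = arr[i+1:]
--         for C in get_combinations(rest_part, n-1):
--             result.append([v]+C)
--     return result
--
-- def get_score(s, team):
--     score = 0
--     for player1 in team:
--         for player2 in team:
--             if player1 == player2:
--                 continue
--             score += s[player1-1][player2-1]
--     return score
--
-- def solution(s):
--     N = len(s)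
--     players = [i for i in range(1, N+1)]
--     min_value = INF
--     # 먼저 모든 경우의 수로 팀을 짜보고 능력치를 비교
--     for it in get_combinations(players, N//2):
--         start = []
--         link = []
--         # 두 팀으로 나눈다.
--         for player in players:
--             if player in it :
--                 start.append(player)
--             else:
--                 link.append(player)
--         # 능력치의 차이를 구한다
--         value = abs(get_score(s, start) - get_score(s, link))
--         # 최소값 갱신
--         if value < min_value:
--             min_value = value
--     return min_value
-- ===== SOURCE B (Python) =====
-- INF = 999999
--
-- def solution(s):
--     N = len(s)
--     half = N // 2
--     players = list(range(1, N + 1))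
--
--     def score(team):
--         total = 0
--         for a in team:
--             for b in team:
--                 if a == b:
--                     continue
--                 total += s[a - 1][b - 1]
--         return total
--
--     def dfs(rest, start, best):
--         if len(start) == half:
--             link = [p for p in players if p not in start]
--             d = abs(score(start) - score(link))
--             return d if d < best else best
--         if not rest or len(start) + len(rest) < half:
--             return best
--         head, tail = rest[0], rest[1:]
--         best = dfs(tail, start + [head], best)
--         return dfs(tail, start, best)
--
--     return dfs(players, [], INF)
-- ===== Notes on version B (the rewrite author's own statement) =====
-- stated objective: alternative
-- what changed: Replaces 'materialize all C(N,N/2) combinations, then re-partition the player list for each' with a recursive include/exclude DFS over the remaining players that prunes dead branches and scores each split at the leaf, threading the running minimum through the recursion.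
-- outside the precondition, e.g. on solution([[1, 2, 3], [4, 5, 6], [7, 8]]): A returns 6, B returns 6
import Mathlib
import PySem

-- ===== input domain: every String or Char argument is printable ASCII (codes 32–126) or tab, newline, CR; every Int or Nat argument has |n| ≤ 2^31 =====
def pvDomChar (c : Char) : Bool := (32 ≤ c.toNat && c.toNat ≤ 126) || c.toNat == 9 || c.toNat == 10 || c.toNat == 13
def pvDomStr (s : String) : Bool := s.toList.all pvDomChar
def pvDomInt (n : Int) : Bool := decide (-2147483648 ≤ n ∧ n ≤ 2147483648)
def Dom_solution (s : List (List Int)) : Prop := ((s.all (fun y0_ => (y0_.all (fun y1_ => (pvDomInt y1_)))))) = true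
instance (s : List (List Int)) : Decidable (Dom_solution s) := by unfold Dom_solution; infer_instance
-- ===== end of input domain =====

-- B replaces A's "materialize every combination, then re-partition the player list" with a
-- pruned include/exclude DFS over the remaining players that scores each split at the leaf
-- (objective: alternative; same asymptotic cost).

-- ===== PORT A =====
-- get_score(s, team): ordered-pair double loop; s[p1-1][p2-1] in range under Pre_ (out-of-range defaults to 0 there, outside Pre_ Python raises)
def getScore (s : List (List Int)) (team : List Int) : Int :=
  team.foldl (fun sc p1 =>
    team.foldl (fun sc p2 =>
      if p1 = p2 then sc
      else sc + PySem.List.pyGetD (PySem.List.pyGetD s (p1 - 1) []) (p2 - 1) 0) sc) 0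

-- get_combinations(arr, n); the for-loop over i (taking arr[i] and arr[i+1:]) is the structural recursion combLoop
mutual
def getCombinations : List Int → Nat → List (List Int)
  | _, 0 => [[]]
  | arr, Nat.succ n => combLoop arr n
  termination_by arr n => (arr.length, 2 * n)
def combLoop : List Int → Nat → List (List Int)
  | [], _ => []
  | v :: rest, n => (getCombinations rest n).map (fun C => v :: C) ++ combLoop rest n
  termination_by arr n => (arr.length, 2 * n + 1)
end

def solution (s : List (List Int)) : Int :=
  let N := s.length
  let players := PySem.List.pyRange 1 ((N : Int) + 1) 1
  (getCombinations players (N / 2)).foldl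
    (fun minv it =>
      let pr := players.foldl
        (fun (p : List Int × List Int) player =>
          if player ∈ it then (p.1 ++ [player], p.2) else (p.1, p.2 ++ [player]))
        ([], [])
      let value := |getScore s pr.1 - getScore s pr.2|
      if value < minv then value else minv)
    999999

-- ===== PORT B =====
def scoreB (s : List (List Int)) (team : List Int) : Int :=
  team.foldl (fun sc p1 =>
    team.foldl (fun sc p2 =>
      if p1 = p2 then sc
      else sc + PySem.List.pyGetD (PySem.List.pyGetD s (p1 - 1) []) (p2 - 1) 0) sc) 0

def dfsB (s : List (List Int)) (players : List Int) (half : Nat) :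
    List Int → List Int → Int → Int
  | rest, start, best =>
    if start.length = half then
      let link := players.filter (fun p => !decide (p ∈ start))
      let d := |scoreB s start - scoreB s link|
      if d < best then d else best
    else
      match rest with
      | [] => best
      | head :: tail =>
        if start.length + (head :: tail).length < half then best
        else
          let best1 := dfsB s players half tail (start ++ [head]) best
          dfsB s players half tail start best1
  termination_by rest => rest.length

def solution_alt (s : List (List Int)) : Int :=
  let N := s.length
  let half := N / 2
  let players := PySem.List.pyRange 1 ((N : Int) + 1) 1
  dfsB s players half players [] 999999

-- ===== PRECONDITION & SPEC =====
-- Pre_ excludes matrices with ≥ 3 rows in which some row is shorter than the number of rows: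
-- there A's get_score generally raises IndexError (a few such ragged inputs where only
-- never-accessed entries are missing still return; they are excluded with the crash-shaped ones).
def Pre_solution (s : List (List Int)) : Prop :=
  s.length ≤ 2 ∨ ∀ row ∈ s, s.length ≤ row.length
instance (s : List (List Int)) : Decidable (Pre_solution s) := by unfold Pre_solution; infer_instance
def pvWitness_solution : List (List Int) := [[1, 2], [3, 4]]

def Spec_solution (s : List (List Int)) (out : Int) : Prop := out = solution_alt s
instance (s : List (List Int)) (out : Int) : Decidable (Spec_solution s out) := by unfold Spec_solution; infer_instance

-- ===== CLAIM (what is proved, stated in full; the proofs are below) =====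
def Claim_equal_solution : Prop := ∀ (s : List (List Int)), Dom_solution s → Pre_solution s → Spec_solution s (solution s)

-- ===== LEMMAS AND PROOFS =====

-- the leaf update both programs perform for a finished team (proof helper)
def updB (s : List (List Int)) (players team : List Int) (b : Int) : Int :=
  let link := players.filter (fun p => !decide (p ∈ team))
  let d := |scoreB s team - scoreB s link|
  if d < b then d else b

-- A's partition loop is the pair of filters
lemma partition_foldl (it players st lk : List Int) :
    players.foldl
      (fun (p : List Int × List Int) player =>
        if player ∈ it then (p.1 ++ [player], p.2) else (p.1, p.2 ++ [player]))
      (st, lk)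
    = (st ++ players.filter (fun p => decide (p ∈ it)),
       lk ++ players.filter (fun p => !decide (p ∈ it))) := by
  induction players generalizing st lk with
  | nil => simp
  | cons a t ih =>
    by_cases h : a ∈ it <;> simp [List.foldl_cons, h, ih, List.append_assoc]

lemma mem_combLoop_sublist : ∀ (arr : List Int) (n : Nat) (it : List Int),
    it ∈ combLoop arr n → it.Sublist arr := by
  intro arr
  induction arr with
  | nil => intro n it h; simp [combLoop] at h
  | cons v rest ih =>
    intro n it h
    simp only [combLoop, List.mem_append, List.mem_map] at h
    rcases h with ⟨c, hc, rfl⟩ | h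
    · apply List.Sublist.cons₂
      cases n with
      | zero =>
        simp [getCombinations] at hc
        subst hc; exact List.nil_sublist _
      | succ m =>
        simp only [getCombinations] at hc
        exact ih m c hc
    · exact List.Sublist.cons _ (ih n it h)

lemma mem_getCombinations_sublist {arr : List Int} {n : Nat} {it : List Int}
    (h : it ∈ getCombinations arr n) : it.Sublist arr := by
  cases n with
  | zero =>
    simp [getCombinations] at h
    subst h; exact List.nil_sublist _
  | succ m =>
    simp only [getCombinations] at h
    exact mem_combLoop_sublist arr m it h

lemma combLoop_eq_nil : ∀ (arr : List Int) (n : Nat), arr.length ≤ n → combLoop arr n = [] := by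
  intro arr
  induction arr with
  | nil => intro n _; simp [combLoop]
  | cons v rest ih =>
    intro n hn
    simp only [List.length_cons] at hn
    obtain ⟨m, rfl⟩ : ∃ m, n = m + 1 := ⟨n - 1, by omega⟩
    simp [combLoop, getCombinations, ih m (by omega), ih (m + 1) (by omega)]

lemma getCombinations_eq_nil {arr : List Int} {n : Nat} (h : arr.length < n) :
    getCombinations arr n = [] := by
  cases n with
  | zero => omega
  | succ m => simpa [getCombinations] using combLoop_eq_nil arr m (by omega)

lemma filter_mem_eq_self : ∀ {l arr : List Int}, l.Sublist arr → arr.Nodup →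
    arr.filter (fun x => decide (x ∈ l)) = l := by
  intro l arr h
  induction h with
  | slnil => intro _; rfl
  | cons a h ih =>
    intro hnd
    rename_i l' arr'
    have hmem : a ∉ l' := fun hl => (List.nodup_cons.mp hnd).1 (h.subset hl)
    simp only [List.filter_cons, hmem, decide_false, Bool.false_eq_true, if_false]
    exact ih (List.nodup_cons.mp hnd).2
  | cons₂ a h ih =>
    intro hnd
    rename_i l' arr'
    have hna : a ∉ arr' := (List.nodup_cons.mp hnd).1
    simp only [List.filter_cons, List.mem_cons, true_or, decide_true, if_true]
    congr 1
    have hcong : List.filter (fun x => decide (x = a ∨ x ∈ l')) arr'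
        = List.filter (fun x => decide (x ∈ l')) arr' :=
      List.filter_congr (fun x hx => by
        have hne : x ≠ a := fun he => hna (he ▸ hx)
        simp [hne])
    rw [hcong]
    exact ih (List.nodup_cons.mp hnd).2

-- B's DFS folds the leaf update over exactly A's combination list
lemma dfsB_eq (s : List (List Int)) (players : List Int) (half : Nat) :
    ∀ (rest start : List Int) (best : Int), start.length ≤ half →
    dfsB s players half rest start best =
      (getCombinations rest (half - start.length)).foldl
        (fun b it => updB s players (start ++ it) b) best := by
  intro rest
  induction rest with
  | nil =>
    intro start best hle
    by_cases hfull : start.length = half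
    · simp [dfsB, hfull, getCombinations, updB]
    · have hlt : start.length < half := lt_of_le_of_ne hle hfull
      rw [getCombinations_eq_nil (by simp only [List.length_nil]; omega)]
      simp [dfsB, hfull]
  | cons head tail ih =>
    intro start best hle
    by_cases hfull : start.length = half
    · simp [dfsB, hfull, getCombinations, updB]
    · have hlt : start.length < half := lt_of_le_of_ne hle hfull
      by_cases hprune : start.length + (head :: tail).length < half
      · rw [getCombinations_eq_nil (by simp only [List.length_cons] at hprune ⊢; omega)]
        rw [dfsB]
        simp only [if_neg hfull, List.foldl_nil]
        rw [if_pos hprune]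
      · obtain ⟨m, hm⟩ : ∃ m, half - start.length = m + 1 := ⟨half - start.length - 1, by omega⟩
        rw [hm]
        rw [dfsB]
        simp only [if_neg hfull]
        rw [if_neg hprune]
        rw [ih (start ++ [head]) best (by simp; omega),
            ih start _ (le_of_lt hlt)]
        have h1 : half - (start ++ [head]).length = m := by simp; omega
        rw [h1, hm]
        have hopen : getCombinations (head :: tail) (m + 1)
            = (getCombinations tail m).map (fun C => head :: C) ++ getCombinations tail (m + 1) := by
          simp [getCombinations, combLoop]
        rw [hopen, List.foldl_append, List.foldl_map]
        have hfun : (fun (x : Int) (y : List Int) => updB s players (start ++ head :: y) x)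
            = fun x y => updB s players (start ++ [head] ++ y) x := by
          funext x y
          rw [List.append_cons]
        rw [hfun]

-- ===== VERDICT (by name: the statement is the Claim_ definition above) =====
theorem solution_spec : Claim_equal_solution := by
  intro s _ _
  show solution s = solution_alt s
  simp only [solution, solution_alt]
  rw [dfsB_eq s _ _ _ [] 999999 (Nat.zero_le _)]
  simp only [List.nil_append, List.length_nil, Nat.sub_zero]
  apply PySem.List.foldl_congr_mem
  intro b it hit
  have hsub := mem_getCombinations_sublist hit
  have hnd : (PySem.List.pyRange 1 ((s.length : Int) + 1) 1).Nodup :=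
    PySem.List.nodup_pyRange_one 1 _
  simp only [partition_foldl, List.nil_append]
  rw [filter_mem_eq_self hsub hnd]
  rfl
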